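-- pv_equiv track=rewrite | github.com/eosbic/Ada | api/services/visual_report_service.py | _render_alerts
-- ===== SOURCE A (Python) =====
-- ALERT_COLORS = {
--     "critical": {"bg": "#2a1215", "border": "#E24B4A", "text": "#F09595", "label": "CRITICO"},
--     "warning":  {"bg": "#2a2008", "border": "#EF9F27", "text": "#FAC775", "label": "ALERTA"},
--     "info":     {"bg": "#0c1a2e", "border": "#378ADD", "text": "#85B7EB", "label": "INFO"},
-- }
--
-- def _render_alerts(alerts):
--     if not alerts:
--         return ""
--     order = {"critical": 0, "warning": 1, "info": 2}
--     sorted_alerts = sorted(alerts, key=lambda a: order.get(a.get("level", "info"), 9))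
--     items = ""
--     for alert in sorted_alerts:
--         level = alert.get("level", "info")
--         message = alert.get("message", "")
--         colors = ALERT_COLORS.get(level, ALERT_COLORS["info"])
--         items += '<div class="alert-item" style="border-left-color: ' + colors["border"] + '; background: ' + colors["bg"] + ';"><span class="alert-label" style="color: ' + colors["border"] + ';">' + colors["label"] + '</span><span class="alert-message" style="color: ' + colors["text"] + ';">' + message + '</span></div>'
--     critical_count = sum(1 for a in alerts if a.get("level") == "critical")
--     warning_count = sum(1 for a in alerts if a.get("level") == "warning")
--     info_count = sum(1 for a in alerts if a.get("level") == "info")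
--     summary = str(critical_count) + " criticas &middot; " + str(warning_count) + " alertas &middot; " + str(info_count) + " informativas"
--     return '<div class="section"><h2 class="section-title">Alertas y senales</h2><div class="alert-summary">' + str(len(alerts)) + ' alertas detectadas &mdash; ' + summary + '</div><div class="alerts-list">' + items + '</div></div>'
-- ===== SOURCE B (Python) =====
-- ALERT_COLORS = {
--     "critical": {"bg": "#2a1215", "border": "#E24B4A", "text": "#F09595", "label": "CRITICO"},
--     "warning":  {"bg": "#2a2008", "border": "#EF9F27", "text": "#FAC775", "label": "ALERTA"},
--     "info":     {"bg": "#0c1a2e", "border": "#378ADD", "text": "#85B7EB", "label": "INFO"},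
-- }
--
-- def _render_alerts(alerts):
--     if not alerts:
--         return ""
--     # one bucketing pass replaces the comparison sort (stable: per-bucket input order)
--     bucket_index = {"critical": 0, "warning": 1, "info": 2}
--     buckets = [[], [], [], []]
--     for a in alerts:
--         buckets[bucket_index.get(a.get("level", "info"), 3)].append(a)
--     items = ""
--     for alert in buckets[0] + buckets[1] + buckets[2] + buckets[3]:
--         level = alert.get("level", "info")
--         message = alert.get("message", "")
--         colors = ALERT_COLORS.get(level, ALERT_COLORS["info"])
--         items += '<div class="alert-item" style="border-left-color: ' + colors["border"] + '; background: ' + colors["bg"] + ';"><span class="alert-label" style="color: ' + colors["border"] + ';">' + colors["label"] + '</span><span class="alert-message" style="color: ' + colors["text"] + ';">' + message + '</span></div>'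
--     # one counting pass replaces the three generator sweeps
--     critical_count = warning_count = info_count = 0
--     for a in alerts:
--         lv = a.get("level")
--         if lv == "critical":
--             critical_count += 1
--         elif lv == "warning":
--             warning_count += 1
--         elif lv == "info":
--             info_count += 1
--     summary = str(critical_count) + " criticas &middot; " + str(warning_count) + " alertas &middot; " + str(info_count) + " informativas"
--     return '<div class="section"><h2 class="section-title">Alertas y senales</h2><div class="alert-summary">' + str(len(alerts)) + ' alertas detectadas &mdash; ' + summary + '</div><div class="alerts-list">' + items + '</div></div>'
-- ===== Notes on version B (the rewrite author's own statement) =====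
-- stated objective: alternative
-- what changed: Replaces the comparison sort with a key function by a single stable bucketing pass into four severity buckets concatenated in order, and replaces the three separate counting sweeps by one pass carrying three tallies.
import Mathlib
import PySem

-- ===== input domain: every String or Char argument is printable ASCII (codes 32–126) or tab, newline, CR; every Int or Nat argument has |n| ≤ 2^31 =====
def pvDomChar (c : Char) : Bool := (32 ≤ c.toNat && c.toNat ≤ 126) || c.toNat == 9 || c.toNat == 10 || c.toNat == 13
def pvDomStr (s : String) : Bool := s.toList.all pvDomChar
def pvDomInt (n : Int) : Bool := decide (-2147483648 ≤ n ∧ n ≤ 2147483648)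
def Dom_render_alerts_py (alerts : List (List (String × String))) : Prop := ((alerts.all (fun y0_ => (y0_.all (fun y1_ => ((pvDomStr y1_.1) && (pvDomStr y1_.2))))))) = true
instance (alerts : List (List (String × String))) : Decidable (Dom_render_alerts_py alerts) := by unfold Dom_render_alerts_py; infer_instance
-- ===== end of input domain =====

-- B replaces A's comparison sort (sorted with a severity key) by a single stable bucketing
-- pass, and A's three counting sweeps by one pass carrying three tallies.

-- ===== PORT A =====
-- module constant ALERT_COLORS (dict of dicts → association lists); shared by both ports
def pvAlertColors : PySem.Dict String (PySem.Dict String String) :=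
  PySem.Dict.mk
  [("critical", PySem.Dict.mk [("bg", "#2a1215"), ("border", "#E24B4A"), ("text", "#F09595"), ("label", "CRITICO")]),
   ("warning",  PySem.Dict.mk [("bg", "#2a2008"), ("border", "#EF9F27"), ("text", "#FAC775"), ("label", "ALERTA")]),
   ("info",     PySem.Dict.mk [("bg", "#0c1a2e"), ("border", "#378ADD"), ("text", "#85B7EB"), ("label", "INFO")])]

-- body of the rendering loop (textually identical in A's and B's Python): the HTML for one
-- alert.  colors["…"] reads literal dicts whose keys are always present; `.getD ""` marks the
-- unreachable KeyError branch of Python's d[k].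
def pvItemHtml (alert : List (String × String)) : String :=
  let level := PySem.Dict.getD (PySem.Dict.mk alert) "level" "info"
  let message := PySem.Dict.getD (PySem.Dict.mk alert) "message" ""
  let colors := PySem.Dict.getD pvAlertColors level ((PySem.Dict.get? pvAlertColors "info").getD (PySem.Dict.mk []))
  "<div class=\"alert-item\" style=\"border-left-color: " ++ (PySem.Dict.get? colors "border").getD ""
    ++ "; background: " ++ (PySem.Dict.get? colors "bg").getD ""
    ++ ";\"><span class=\"alert-label\" style=\"color: " ++ (PySem.Dict.get? colors "border").getD ""
    ++ ";\">" ++ (PySem.Dict.get? colors "label").getD ""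
    ++ "</span><span class=\"alert-message\" style=\"color: " ++ (PySem.Dict.get? colors "text").getD ""
    ++ ";\">" ++ message ++ "</span></div>"

def render_alerts_py (alerts : List (List (String × String))) : String :=
  if alerts.isEmpty then "" else
  let order : PySem.Dict String Int := PySem.Dict.mk [("critical", 0), ("warning", 1), ("info", 2)]
  let sorted_alerts := PySem.List.sorted alerts
      (fun a => PySem.Dict.getD order (PySem.Dict.getD (PySem.Dict.mk a) "level" "info") 9) false
  let items := sorted_alerts.foldl (fun acc alert => acc ++ pvItemHtml alert) ""
  let critical_count : Int :=
    (alerts.map (fun a => if PySem.Dict.get? (PySem.Dict.mk a) "level" = some "critical" then (1 : Int) else 0)).sum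
  let warning_count : Int :=
    (alerts.map (fun a => if PySem.Dict.get? (PySem.Dict.mk a) "level" = some "warning" then (1 : Int) else 0)).sum
  let info_count : Int :=
    (alerts.map (fun a => if PySem.Dict.get? (PySem.Dict.mk a) "level" = some "info" then (1 : Int) else 0)).sum
  let summary := PySem.Int.toStr critical_count ++ " criticas &middot; "
      ++ PySem.Int.toStr warning_count ++ " alertas &middot; "
      ++ PySem.Int.toStr info_count ++ " informativas"
  "<div class=\"section\"><h2 class=\"section-title\">Alertas y senales</h2><div class=\"alert-summary\">"
    ++ PySem.Int.toStr (alerts.length : Int) ++ " alertas detectadas &mdash; " ++ summary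
    ++ "</div><div class=\"alerts-list\">" ++ items ++ "</div></div>"

-- ===== PORT B =====
-- Python's `buckets` (a list of four lists indexed 0..3) is the 4-tuple `bs`.
def render_alerts_py_alt (alerts : List (List (String × String))) : String :=
  if alerts.isEmpty then "" else
  let bucket_index : PySem.Dict String Int := PySem.Dict.mk [("critical", 0), ("warning", 1), ("info", 2)]
  let bs := alerts.foldl
    (fun (b : List (List (String × String)) × List (List (String × String)) ×
               List (List (String × String)) × List (List (String × String))) a =>
      let i := PySem.Dict.getD bucket_index (PySem.Dict.getD (PySem.Dict.mk a) "level" "info") 3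
      if i = 0 then (b.1 ++ [a], b.2.1, b.2.2.1, b.2.2.2)
      else if i = 1 then (b.1, b.2.1 ++ [a], b.2.2.1, b.2.2.2)
      else if i = 2 then (b.1, b.2.1, b.2.2.1 ++ [a], b.2.2.2)
      else (b.1, b.2.1, b.2.2.1, b.2.2.2 ++ [a])) ([], [], [], [])
  let items := (bs.1 ++ bs.2.1 ++ bs.2.2.1 ++ bs.2.2.2).foldl
      (fun acc alert => acc ++ pvItemHtml alert) ""
  let counts := alerts.foldl
    (fun (t : Int × Int × Int) a =>
      let lv := PySem.Dict.get? (PySem.Dict.mk a) "level"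
      if lv = some "critical" then (t.1 + 1, t.2.1, t.2.2)
      else if lv = some "warning" then (t.1, t.2.1 + 1, t.2.2)
      else if lv = some "info" then (t.1, t.2.1, t.2.2 + 1)
      else t) (0, 0, 0)
  let summary := PySem.Int.toStr counts.1 ++ " criticas &middot; "
      ++ PySem.Int.toStr counts.2.1 ++ " alertas &middot; "
      ++ PySem.Int.toStr counts.2.2 ++ " informativas"
  "<div class=\"section\"><h2 class=\"section-title\">Alertas y senales</h2><div class=\"alert-summary\">"
    ++ PySem.Int.toStr (alerts.length : Int) ++ " alertas detectadas &mdash; " ++ summary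
    ++ "</div><div class=\"alerts-list\">" ++ items ++ "</div></div>"

-- ===== PRECONDITION & SPEC =====
def Spec_render_alerts_py (alerts : List (List (String × String))) (out : String) : Prop := out = render_alerts_py_alt alerts
instance (alerts : List (List (String × String))) (out : String) : Decidable (Spec_render_alerts_py alerts out) := by unfold Spec_render_alerts_py; infer_instance

-- ===== CLAIM (what is proved, stated in full; the proofs are below) =====
def Claim_equal_render_alerts_py : Prop := ∀ (alerts : List (List (String × String))), Dom_render_alerts_py alerts → Spec_render_alerts_py alerts (render_alerts_py alerts)

-- ===== LEMMAS AND PROOFS =====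

-- the severity key A sorts by
def pvKey (a : List (String × String)) : Int :=
  PySem.Dict.getD (PySem.Dict.mk [("critical", (0:Int)), ("warning", 1), ("info", 2)]) (PySem.Dict.getD (PySem.Dict.mk a) "level" "info") 9

theorem pvKey_cases (a : List (String × String)) :
    pvKey a = 0 ∨ pvKey a = 1 ∨ pvKey a = 2 ∨ pvKey a = 9 := by
  unfold pvKey
  set lv := PySem.Dict.getD (PySem.Dict.mk a) "level" "info" with hlv
  by_cases h1 : lv = "critical"
  · left; rw [h1]; rfl
  by_cases h2 : lv = "warning"
  · right; left; rw [h2]; rfl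
  by_cases h3 : lv = "info"
  · right; right; left; rw [h3]; rfl
  right; right; right
  simp [PySem.Dict.getD, PySem.Dict.get?, Ne.symm h1, Ne.symm h2, Ne.symm h3]

-- B's bucket index agrees with pvKey (3 stands for 9)
theorem pvIdx_eq (a : List (String × String)) :
    PySem.Dict.getD (PySem.Dict.mk [("critical", (0:Int)), ("warning", 1), ("info", 2)])
        (PySem.Dict.getD (PySem.Dict.mk a) "level" "info") 3
      = if pvKey a = 9 then 3 else pvKey a := by
  unfold pvKey
  set lv := PySem.Dict.getD (PySem.Dict.mk a) "level" "info" with hlv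
  by_cases h1 : lv = "critical"
  · rw [h1]; rfl
  by_cases h2 : lv = "warning"
  · rw [h2]; rfl
  by_cases h3 : lv = "info"
  · rw [h3]; rfl
  simp [PySem.Dict.getD, PySem.Dict.get?, Ne.symm h1, Ne.symm h2, Ne.symm h3]

theorem pv_insertBy_nil {α : Type} (before : α → α → Bool) (x : α) :
    PySem.List.insertBy before x [] = [x] := rfl

theorem pv_insertBy_cons {α : Type} (before : α → α → Bool) (x y : α) (ys : List α) :
    PySem.List.insertBy before x (y :: ys) =
      if before x y then x :: y :: ys else y :: PySem.List.insertBy before x ys := rfl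

-- insertion skips a prefix of non-greater-key elements (stability)
theorem pv_insertBy_prefix {α : Type} (before : α → α → Bool) (x : α) (p s : List α)
    (h : ∀ y ∈ p, before x y = false) :
    PySem.List.insertBy before x (p ++ s) = p ++ PySem.List.insertBy before x s := by
  induction p with
  | nil => simp
  | cons y ys ih =>
      have hy := h y (by simp)
      rw [List.cons_append, pv_insertBy_cons, if_neg (by simp [hy]),
          ih (fun z hz => h z (by simp [hz]))]
      simp

theorem pv_insertBy_front {α : Type} (before : α → α → Bool) (x : α) (s : List α)
    (h : ∀ y ∈ s, before x y = true) :
    PySem.List.insertBy before x s = x :: s := by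
  cases s with
  | nil => rfl
  | cons y ys => simp [pv_insertBy_cons, h y (by simp)]

theorem pv_filter_key {α : Type} (key : α → Int) (i : Int) (xs : List α) (y : α)
    (hy : y ∈ xs.filter (fun a => key a == i)) : key y = i := by
  simp [List.mem_filter] at hy; exact hy.2

-- A stable comparison sort on a key with values in {0,1,2,9} is the concatenation of
-- the four key-buckets in input order.
theorem pv_sorted_buckets {α : Type} (key : α → Int)
    (hk : ∀ a, key a = 0 ∨ key a = 1 ∨ key a = 2 ∨ key a = 9) (xs : List α) :
    PySem.List.sorted xs key false =
      xs.filter (fun a => key a == 0) ++ (xs.filter (fun a => key a == 1)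
        ++ (xs.filter (fun a => key a == 2) ++ xs.filter (fun a => key a == 9))) := by
  rw [PySem.List.sorted_eq_foldl_insertBy]
  induction xs using List.reverseRecOn with
  | nil => rfl
  | append_singleton xs x ih =>
      rw [List.foldl_append, List.foldl_cons, List.foldl_nil, ih]
      simp only [List.filter_append, List.filter_cons, List.filter_nil]
      set F0 := xs.filter (fun a => key a == 0) with hF0
      set F1 := xs.filter (fun a => key a == 1) with hF1
      set F2 := xs.filter (fun a => key a == 2) with hF2
      set F9 := xs.filter (fun a => key a == 9) with hF9
      have m0 : ∀ y ∈ F0, key y = 0 := fun y hy => pv_filter_key key 0 xs y (hF0 ▸ hy)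
      have m1 : ∀ y ∈ F1, key y = 1 := fun y hy => pv_filter_key key 1 xs y (hF1 ▸ hy)
      have m2 : ∀ y ∈ F2, key y = 2 := fun y hy => pv_filter_key key 2 xs y (hF2 ▸ hy)
      have m9 : ∀ y ∈ F9, key y = 9 := fun y hy => pv_filter_key key 9 xs y (hF9 ▸ hy)
      rcases hk x with h|h|h|h
      · rw [pv_insertBy_prefix _ _ F0 _ (fun y hy => by simp [m0 y hy, h]),
            pv_insertBy_front _ _ _ (fun y hy => by
              rcases List.mem_append.1 hy with hy|hy
              · simp [m1 y hy, h]
              · rcases List.mem_append.1 hy with hy|hy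
                · simp [m2 y hy, h]
                · simp [m9 y hy, h])]
        simp [h]
      · rw [show F0 ++ (F1 ++ (F2 ++ F9)) = (F0 ++ F1) ++ (F2 ++ F9) by simp,
            pv_insertBy_prefix _ _ (F0 ++ F1) _ (fun y hy => by
              rcases List.mem_append.1 hy with hy|hy
              · simp [m0 y hy, h]
              · simp [m1 y hy, h]),
            pv_insertBy_front _ _ _ (fun y hy => by
              rcases List.mem_append.1 hy with hy|hy
              · simp [m2 y hy, h]
              · simp [m9 y hy, h])]
        simp [h]
      · rw [show F0 ++ (F1 ++ (F2 ++ F9)) = (F0 ++ F1 ++ F2) ++ F9 by simp,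
            pv_insertBy_prefix _ _ (F0 ++ F1 ++ F2) _ (fun y hy => by
              rcases List.mem_append.1 hy with hy|hy
              · rcases List.mem_append.1 hy with hy|hy
                · simp [m0 y hy, h]
                · simp [m1 y hy, h]
              · simp [m2 y hy, h]),
            pv_insertBy_front _ _ _ (fun y hy => by simp [m9 y hy, h])]
        simp [h]
      · rw [show F0 ++ (F1 ++ (F2 ++ F9)) = (F0 ++ F1 ++ F2 ++ F9) ++ [] by simp,
            pv_insertBy_prefix _ _ (F0 ++ F1 ++ F2 ++ F9) _ (fun y hy => by
              rcases List.mem_append.1 hy with hy|hy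
              · rcases List.mem_append.1 hy with hy|hy
                · rcases List.mem_append.1 hy with hy|hy
                  · simp [m0 y hy, h]
                  · simp [m1 y hy, h]
                · simp [m2 y hy, h]
              · simp [m9 y hy, h])]
        simp [h, pv_insertBy_nil]

-- B's bucketing pass computes exactly the four key-filters, in input order
theorem pv_buckets (xs : List (List (String × String)))
    (c0 c1 c2 c3 : List (List (String × String))) :
    xs.foldl
      (fun (b : List (List (String × String)) × List (List (String × String)) ×
                 List (List (String × String)) × List (List (String × String))) a =>
        let i := PySem.Dict.getD (PySem.Dict.mk [("critical", (0:Int)), ("warning", 1), ("info", 2)])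
                   (PySem.Dict.getD (PySem.Dict.mk a) "level" "info") 3
        if i = 0 then (b.1 ++ [a], b.2.1, b.2.2.1, b.2.2.2)
        else if i = 1 then (b.1, b.2.1 ++ [a], b.2.2.1, b.2.2.2)
        else if i = 2 then (b.1, b.2.1, b.2.2.1 ++ [a], b.2.2.2)
        else (b.1, b.2.1, b.2.2.1, b.2.2.2 ++ [a])) (c0, c1, c2, c3)
    = (c0 ++ xs.filter (fun a => pvKey a == 0), c1 ++ xs.filter (fun a => pvKey a == 1),
       c2 ++ xs.filter (fun a => pvKey a == 2), c3 ++ xs.filter (fun a => pvKey a == 9)) := by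
  induction xs generalizing c0 c1 c2 c3 with
  | nil => simp
  | cons a xs ih =>
      rw [List.foldl_cons]
      simp only [pvIdx_eq a, List.filter_cons]
      rcases pvKey_cases a with h|h|h|h <;>
        simp only [h] <;> norm_num <;> rw [ih] <;> simp

-- B's single counting pass computes A's three 0/1-sums
theorem pv_counts (xs : List (List (String × String))) (c w i : Int) :
    xs.foldl
      (fun (t : Int × Int × Int) a =>
        let lv := PySem.Dict.get? (PySem.Dict.mk a) "level"
        if lv = some "critical" then (t.1 + 1, t.2.1, t.2.2)
        else if lv = some "warning" then (t.1, t.2.1 + 1, t.2.2)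
        else if lv = some "info" then (t.1, t.2.1, t.2.2 + 1)
        else t) (c, w, i)
    = (c + (xs.map (fun a => if PySem.Dict.get? (PySem.Dict.mk a) "level" = some "critical" then (1 : Int) else 0)).sum,
       w + (xs.map (fun a => if PySem.Dict.get? (PySem.Dict.mk a) "level" = some "warning" then (1 : Int) else 0)).sum,
       i + (xs.map (fun a => if PySem.Dict.get? (PySem.Dict.mk a) "level" = some "info" then (1 : Int) else 0)).sum) := by
  induction xs generalizing c w i with
  | nil => simp
  | cons a xs ih =>
      rw [List.foldl_cons]
      simp only [List.map_cons, List.sum_cons]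
      by_cases h1 : PySem.Dict.get? (PySem.Dict.mk a) "level" = some "critical"
      · simp only [h1]; norm_num; rw [ih]
        simp only [Prod.mk.injEq]
        refine ⟨by simp [add_assoc, add_comm, add_left_comm], by simp [add_assoc, add_comm, add_left_comm], by simp [add_assoc, add_comm, add_left_comm]⟩
      · by_cases h2 : PySem.Dict.get? (PySem.Dict.mk a) "level" = some "warning"
        · simp only [h1, h2]; norm_num; rw [ih]
          simp only [Prod.mk.injEq, if_neg h1]
          refine ⟨by simp [add_assoc, add_comm, add_left_comm], by simp [add_assoc, add_comm, add_left_comm], by simp [add_assoc, add_comm, add_left_comm]⟩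
        · by_cases h3 : PySem.Dict.get? (PySem.Dict.mk a) "level" = some "info"
          · simp only [h1, h2, h3]; norm_num; rw [ih]
            simp only [Prod.mk.injEq, if_neg h1, if_neg h2]
            refine ⟨by simp [add_assoc, add_comm, add_left_comm], by simp [add_assoc, add_comm, add_left_comm], by simp [add_assoc, add_comm, add_left_comm]⟩
          · simp only [h1, h2, h3]; norm_num; rw [ih]

-- ===== VERDICT (by name: the statement is the Claim_ definition above) =====
theorem render_alerts_py_spec : Claim_equal_render_alerts_py := by
  intro alerts _
  unfold Spec_render_alerts_py render_alerts_py render_alerts_py_alt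
  by_cases h : alerts.isEmpty
  · simp [h]
  · simp only [h, Bool.false_eq_true, if_false]
    rw [show (fun a => PySem.Dict.getD (PySem.Dict.mk [("critical", (0:Int)), ("warning", 1), ("info", 2)])
          (PySem.Dict.getD (PySem.Dict.mk a) "level" "info") 9) = pvKey from rfl,
        pv_sorted_buckets pvKey pvKey_cases alerts, pv_buckets alerts [] [] [] [], pv_counts alerts 0 0 0]
    simp [List.append_assoc]
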